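-- pv_equiv track=rewrite | github.com/1139779284/clean | model_security_gate/t0/defense_leaderboard.py | _paired_counts
-- ===== SOURCE A (Python) =====
-- from typing import Any, Iterable, Mapping, Sequence
--
-- def _paired_counts(
--     poisoned_rows: Mapping[str, Mapping[str, Any]],
--     defended_rows: Mapping[str, Mapping[str, Any]],
-- ) -> dict[str, int]:
--     """Return (a, b, c, d) counts for a McNemar 2x2 table.
--
--     a: both success, b: baseline-only success, c: defended-only success,
--     d: neither success.
--     """
--
--     a = b = c = d = 0
--     common = sorted(set(poisoned_rows) & set(defended_rows))
--     for key in common: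
--         before = bool(poisoned_rows[key].get("success", False))
--         after = bool(defended_rows[key].get("success", False))
--         if before and after:
--             a += 1
--         elif before and not after:
--             b += 1
--         elif not before and after:
--             c += 1
--         else:
--             d += 1
--     return {"a": a, "b": b, "c": c, "d": d, "n_paired": len(common)}
-- ===== SOURCE B (Python) =====
-- def _succ(rows, key):
--     return bool(rows[key].get("success", False))
--
--
-- def _paired_counts(poisoned_rows, defended_rows):
--     common = set(poisoned_rows) & set(defended_rows)
--     pS = {k for k in common if _succ(poisoned_rows, k)}
--     dS = {k for k in common if _succ(defended_rows, k)}
--     a = len(pS & dS)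
--     b = len(pS - dS)
--     c = len(dS - pS)
--     n = len(common)
--     return {"a": a, "b": b, "c": c, "d": n - a - b - c, "n_paired": n}
-- ===== Notes on version B (the rewrite author's own statement) =====
-- stated objective: simpler
-- what changed: Replaces the sorted-key loop with four per-key branches by set algebra: two success index sets over the common keys, cells derived as len(pS&dS), len(pS-dS), len(dS-pS) and n-a-b-c, with no per-key branching loop.
import Mathlib
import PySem

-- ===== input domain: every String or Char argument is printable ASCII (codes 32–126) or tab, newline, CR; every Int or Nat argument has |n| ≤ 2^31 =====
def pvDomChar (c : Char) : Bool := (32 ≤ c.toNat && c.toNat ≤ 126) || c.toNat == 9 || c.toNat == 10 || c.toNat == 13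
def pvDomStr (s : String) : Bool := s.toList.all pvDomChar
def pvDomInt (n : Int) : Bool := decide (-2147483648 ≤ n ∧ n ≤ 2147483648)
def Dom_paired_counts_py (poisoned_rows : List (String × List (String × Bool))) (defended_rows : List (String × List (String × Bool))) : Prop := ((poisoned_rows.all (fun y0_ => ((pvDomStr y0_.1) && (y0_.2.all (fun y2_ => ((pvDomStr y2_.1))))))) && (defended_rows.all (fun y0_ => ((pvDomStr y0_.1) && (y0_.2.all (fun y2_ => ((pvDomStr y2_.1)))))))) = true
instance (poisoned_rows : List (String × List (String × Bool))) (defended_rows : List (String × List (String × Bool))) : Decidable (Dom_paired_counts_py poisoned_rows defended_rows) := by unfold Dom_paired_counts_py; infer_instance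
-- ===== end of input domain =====

-- B replaces A's sorted-key branching loop by set algebra over two success index sets (simpler, branch-free derivation of the McNemar cells).


-- ===== PORT A =====
-- bool(rows[key].get("success", False)); key is always a common key, so rows[key] never raises (the .getD [] is unreachable)
def pvSucc (rows : List (String × List (String × Bool))) (key : String) : Bool :=
  PySem.Dict.getD ⟨(PySem.Dict.get? ⟨rows⟩ key).getD []⟩ "success" false

-- the body of A's for-loop, updating the (a, b, c, d) counters
def pvStepA (pr dr : List (String × List (String × Bool))) (st : Int × Int × Int × Int) (key : String) : Int × Int × Int × Int :=
  let before := pvSucc pr key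
  let after := pvSucc dr key
  if before && after then (st.1 + 1, st.2.1, st.2.2.1, st.2.2.2)
  else if before && !after then (st.1, st.2.1 + 1, st.2.2.1, st.2.2.2)
  else if !before && after then (st.1, st.2.1, st.2.2.1 + 1, st.2.2.2)
  else (st.1, st.2.1, st.2.2.1, st.2.2.2 + 1)

def paired_counts_py (poisoned_rows : List (String × List (String × Bool))) (defended_rows : List (String × List (String × Bool))) : List (String × Int) :=
  let common := PySem.List.sorted (PySem.Set.inter (PySem.Set.ofList (poisoned_rows.map Prod.fst)) (PySem.Set.ofList (defended_rows.map Prod.fst))) (fun x => x) false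
  let st := common.foldl (pvStepA poisoned_rows defended_rows) (0, 0, 0, 0)
  [("a", st.1), ("b", st.2.1), ("c", st.2.2.1), ("d", st.2.2.2), ("n_paired", (common.length : Int))]

-- ===== PORT B =====
def paired_counts_py_alt (poisoned_rows : List (String × List (String × Bool))) (defended_rows : List (String × List (String × Bool))) : List (String × Int) :=
  let common : PySem.Set String := PySem.Set.inter (PySem.Set.ofList (poisoned_rows.map Prod.fst)) (PySem.Set.ofList (defended_rows.map Prod.fst))
  let pS : PySem.Set String := common.filter (fun k => pvSucc poisoned_rows k)
  let dS : PySem.Set String := common.filter (fun k => pvSucc defended_rows k)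
  let a := PySem.Set.len (PySem.Set.inter pS dS)
  let b := PySem.Set.len (PySem.Set.diff pS dS)
  let c := PySem.Set.len (PySem.Set.diff dS pS)
  let n := PySem.Set.len common
  [("a", a), ("b", b), ("c", c), ("d", n - a - b - c), ("n_paired", n)]

-- ===== PRECONDITION & SPEC =====
def Spec_paired_counts_py (poisoned_rows : List (String × List (String × Bool))) (defended_rows : List (String × List (String × Bool))) (out : List (String × Int)) : Prop := out = paired_counts_py_alt poisoned_rows defended_rows
instance (poisoned_rows : List (String × List (String × Bool))) (defended_rows : List (String × List (String × Bool))) (out : List (String × Int)) : Decidable (Spec_paired_counts_py poisoned_rows defended_rows out) := by unfold Spec_paired_counts_py; infer_instance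

-- ===== CLAIM (what is proved, stated in full; the proofs are below) =====
def Claim_equal_paired_counts_py : Prop := ∀ (poisoned_rows : List (String × List (String × Bool))) (defended_rows : List (String × List (String × Bool))), Dom_paired_counts_py poisoned_rows defended_rows → Spec_paired_counts_py poisoned_rows defended_rows (paired_counts_py poisoned_rows defended_rows)

-- ===== LEMMAS AND PROOFS =====

-- A's counter loop computes the four countP's
theorem foldA_counts (pr dr : List (String × List (String × Bool))) (l : List String) (a b c d : Int) :
    l.foldl (pvStepA pr dr) (a, b, c, d) =
      (a + l.countP (fun k => pvSucc pr k && pvSucc dr k),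
       b + l.countP (fun k => pvSucc pr k && !pvSucc dr k),
       c + l.countP (fun k => !pvSucc pr k && pvSucc dr k),
       d + l.countP (fun k => !pvSucc pr k && !pvSucc dr k)) := by
  induction l generalizing a b c d with
  | nil => simp
  | cons x xs ih =>
    simp only [List.foldl_cons, List.countP_cons]
    cases hp : pvSucc pr x <;> cases hq : pvSucc dr x <;>
      simp [pvStepA, hp, hq, ih, add_assoc, add_comm]

-- the four cells partition the common keys
theorem countP_partition (P Q : String → Bool) (l : List String) :
    l.countP (fun k => P k && Q k) + l.countP (fun k => P k && !Q k) +
      l.countP (fun k => !P k && Q k) + l.countP (fun k => !P k && !Q k) = l.length := by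
  induction l with
  | nil => simp
  | cons x xs ih =>
    simp only [List.countP_cons, List.length_cons]
    cases P x <;> cases Q x <;> simp <;> omega

-- len (filter P C ∩ filter Q C) counts P ∧ Q over C, when C has no duplicates
theorem contains_filter_eq (Q : String → Bool) (C : List String) (k : String) (hk : k ∈ C) :
    ((C.filter Q).contains k) = Q k := by
  cases hq : Q k
  · have : k ∉ C.filter Q := by simp [List.mem_filter, hq]
    simpa using this
  · have : k ∈ C.filter Q := List.mem_filter.mpr ⟨hk, hq⟩
    simpa using this

-- len (filter P C ∩ filter Q C) counts P ∧ Q over C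
theorem len_inter_filter (P Q : String → Bool) (C : List String) :
    (PySem.Set.inter (C.filter P) (C.filter Q)).length = C.countP (fun k => P k && Q k) := by
  unfold PySem.Set.inter
  rw [← List.countP_eq_length_filter, List.countP_filter]
  apply List.countP_congr
  intro k hk
  rw [PySem.Set.contains, contains_filter_eq Q C k hk, Bool.and_comm]

-- len (filter P C \ filter Q C) counts P ∧ ¬Q over C
theorem len_diff_filter (P Q : String → Bool) (C : List String) :
    (PySem.Set.diff (C.filter P) (C.filter Q)).length = C.countP (fun k => P k && !Q k) := by
  unfold PySem.Set.diff
  rw [← List.countP_eq_length_filter, List.countP_filter]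
  apply List.countP_congr
  intro k hk
  rw [PySem.Set.contains, contains_filter_eq Q C k hk, Bool.and_comm]

theorem paired_counts_eq (pr dr : List (String × List (String × Bool))) :
    paired_counts_py pr dr = paired_counts_py_alt pr dr := by
  simp only [paired_counts_py, paired_counts_py_alt]
  set C := PySem.Set.inter (PySem.Set.ofList (pr.map Prod.fst)) (PySem.Set.ofList (dr.map Prod.fst)) with hCdef
  have hperm := PySem.List.sorted_perm C (fun x => x) false
  rw [foldA_counts]
  have hcount : ∀ (p : String → Bool),
      (PySem.List.sorted C (fun x => x) false).countP p = C.countP p :=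
    fun p => hperm.countP_eq p
  have hlen : (PySem.List.sorted C (fun x => x) false).length = C.length := hperm.length_eq
  have ha := len_inter_filter (fun k => pvSucc pr k) (fun k => pvSucc dr k) C
  have hb := len_diff_filter (fun k => pvSucc pr k) (fun k => pvSucc dr k) C
  have hc := len_diff_filter (fun k => pvSucc dr k) (fun k => pvSucc pr k) C
  have hpart := countP_partition (fun k => pvSucc pr k) (fun k => pvSucc dr k) C
  have hc' : C.countP (fun k => pvSucc dr k && !pvSucc pr k) = C.countP (fun k => !pvSucc pr k && pvSucc dr k) := by
    apply List.countP_congr; intro k _; rw [Bool.and_comm]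
  simp only [PySem.Set.len, hcount, hlen, zero_add, ha, hb, hc, hc', List.cons.injEq, Prod.mk.injEq]
  simp only [true_and, and_true]
  omega

-- ===== VERDICT (by name: the statement is the Claim_ definition above) =====
theorem paired_counts_py_spec : Claim_equal_paired_counts_py := by
  intro pr dr _
  unfold Spec_paired_counts_py
  exact paired_counts_eq pr dr
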